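-- pv_equiv track=rewrite | github.com/cirosantilli/project-euler-solutions | solvers/873.py | w_exact
-- ===== SOURCE A (Python) =====
-- from math import comb
--
-- def w_exact(p: int, q: int, r: int) -> int:
--     """
--     Exact computation using a closed form (suitable for small parameters).
--     """
--     if p < 0 or q < 0 or r < 0:
--         return 0
--     if p == 0 and q == 0:
--         return 1
--     if p == 0 or q == 0:
--         # No A-B interaction; just multinomial count.
--         n = p + q + r
--         # choose positions of C then positions of the remaining letter
--         return comb(n, r) * comb(n - r, p)
--
--     n = p + q
--     tmax_transitions = 2 * min(p, q) - (1 if p == q else 0)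
--     tmax = min(tmax_transitions, r // 2)
--
--     total = 0
--     for t in range(0, tmax + 1):
--         runs = t + 1
--
--         # start with A
--         a_runs = (runs + 1) // 2
--         b_runs = runs // 2
--         cnt = 0
--         if a_runs <= p and b_runs <= q and a_runs > 0 and b_runs > 0:
--             cnt += comb(p - 1, a_runs - 1) * comb(q - 1, b_runs - 1)
--
--         # start with B
--         a_runs2 = runs // 2
--         b_runs2 = (runs + 1) // 2
--         if a_runs2 <= p and b_runs2 <= q and a_runs2 > 0 and b_runs2 > 0:
--             cnt += comb(p - 1, a_runs2 - 1) * comb(q - 1, b_runs2 - 1)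
--
--         if cnt == 0:
--             continue
--
--         # Distribute C's into (n+1) gaps, but each of the t transition gaps needs >=2 Cs.
--         # Remaining: r' = r - 2t Cs distributed freely.
--         total += cnt * comb((r - 2 * t) + n, n)
--
--     return total
-- ===== SOURCE B (Python) =====
-- from math import comb
--
-- def w_exact(p: int, q: int, r: int) -> int:
--     # Rolling-product loop: all binomials are maintained incrementally by exact
--     # integer recurrences (Pascal ratio updates) instead of being recomputed with
--     # comb() at every transition count.
--     if p < 0 or q < 0 or r < 0:
--         return 0
--     if p == 0 and q == 0:
--         return 1
--     if p == 0 or q == 0: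
--         n = p + q + r
--         return comb(n, r) * comb(n - r, p)
--     n = p + q
--     tmax = min(2 * min(p, q) - (1 if p == q else 0), r // 2)
--     total = 0
--     # state at t = 1: high/low run counts are both 1
--     cph = cpl = 1   # C(p-1, h-1), C(p-1, l-1)
--     cqh = cql = 1   # C(q-1, h-1), C(q-1, l-1)
--     w = comb(r - 2 + n, n)   # C(r - 2t + n, n) at t = 1
--     t = 1
--     while t <= tmax:
--         total += (cph * cql + cpl * cqh) * w
--         if t % 2 == 1:
--             h = (t + 2) // 2          # high run count increments
--             cph = cph * (p - h) // h
--             cqh = cqh * (q - h) // h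
--         else:
--             l = (t + 1) // 2          # low run count increments
--             cpl = cpl * (p - l) // l
--             cql = cql * (q - l) // l
--         M = r - 2 * t + n
--         w = w * (M - n) * (M - n - 1) // (M * (M - 1))
--         t += 1
--     return total
-- ===== Notes on version B (the rewrite author's own statement) =====
-- stated objective: faster
-- what changed: Instead of calling comb() three times per transition count t (each an O(t)-factor product) with ceil/floor run-count case analysis, B maintains all binomial coefficients as rolling state updated by exact Pascal-ratio recurrences (C(m,k+1)=C(m,k)*(m-k)//(k+1) and a two-step downdate of the gap-weight binomial), so each loop step does O(1) big-int operations; guards disappear because out-of-range coefficients roll to 0.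
import Mathlib
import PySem

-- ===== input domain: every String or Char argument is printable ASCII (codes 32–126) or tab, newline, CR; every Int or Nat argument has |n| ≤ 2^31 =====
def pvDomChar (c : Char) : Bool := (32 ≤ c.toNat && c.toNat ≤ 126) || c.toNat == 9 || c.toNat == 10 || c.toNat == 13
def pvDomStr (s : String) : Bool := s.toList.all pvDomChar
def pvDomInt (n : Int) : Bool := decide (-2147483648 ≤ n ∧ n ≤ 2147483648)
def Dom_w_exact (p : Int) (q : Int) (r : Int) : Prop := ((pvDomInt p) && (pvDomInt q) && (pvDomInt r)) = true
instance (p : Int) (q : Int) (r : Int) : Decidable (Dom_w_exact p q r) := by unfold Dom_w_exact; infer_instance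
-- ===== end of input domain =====

-- B replaces A's per-iteration comb() calls by rolling binomial coefficients updated with
-- exact Pascal-ratio integer recurrences (one O(1) update per step instead of recomputing
-- three binomials); objective: faster (constant work per loop iteration).


-- math.comb; exact for n, k ≥ 0, the only arguments either program reaches
def pycomb (n k : Int) : Int := (Nat.choose n.toNat k.toNat : Int)

-- ===== PORT A =====
def w_exact (p : Int) (q : Int) (r : Int) : Int :=
  if p < 0 ∨ q < 0 ∨ r < 0 then 0
  else if p = 0 ∧ q = 0 then 1
  else if p = 0 ∨ q = 0 then
    let n := p + q + r
    pycomb n r * pycomb (n - r) p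
  else
    let n := p + q
    let tmaxTransitions := 2 * min p q - (if p = q then 1 else 0)
    let tmax := min tmaxTransitions (PySem.Int.floordiv r 2)
    (PySem.List.pyRange 0 (tmax + 1) 1).foldl (fun total t =>
      let runs := t + 1
      let aRuns := PySem.Int.floordiv (runs + 1) 2
      let bRuns := PySem.Int.floordiv runs 2
      let cnt1 : Int :=
        if aRuns ≤ p ∧ bRuns ≤ q ∧ 0 < aRuns ∧ 0 < bRuns then
          pycomb (p - 1) (aRuns - 1) * pycomb (q - 1) (bRuns - 1) else 0
      let aRuns2 := PySem.Int.floordiv runs 2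
      let bRuns2 := PySem.Int.floordiv (runs + 1) 2
      let cnt : Int := cnt1 +
        (if aRuns2 ≤ p ∧ bRuns2 ≤ q ∧ 0 < aRuns2 ∧ 0 < bRuns2 then
          pycomb (p - 1) (aRuns2 - 1) * pycomb (q - 1) (bRuns2 - 1) else 0)
      if cnt = 0 then total
      else total + cnt * pycomb ((r - 2 * t) + n) n) 0

-- ===== PORT B =====
-- B's while-loop: six rolling integers, updated by exact-division recurrences
def bLoop (p q r n tmax t cph cpl cqh cql w total : Int) : Int :=
  if _h : t ≤ tmax then
    let total' := total + (cph * cql + cpl * cqh) * w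
    let M := r - 2 * t + n
    let w' := PySem.Int.floordiv (w * (M - n) * (M - n - 1)) (M * (M - 1))
    if PySem.Int.mod t 2 = 1 then
      let hh := PySem.Int.floordiv (t + 2) 2
      bLoop p q r n tmax (t + 1)
        (PySem.Int.floordiv (cph * (p - hh)) hh) cpl
        (PySem.Int.floordiv (cqh * (q - hh)) hh) cql w' total'
    else
      let l := PySem.Int.floordiv (t + 1) 2
      bLoop p q r n tmax (t + 1)
        cph (PySem.Int.floordiv (cpl * (p - l)) l)
        cqh (PySem.Int.floordiv (cql * (q - l)) l) w' total'
  else total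
termination_by (tmax + 1 - t).toNat
decreasing_by all_goals omega

def w_exact_alt (p : Int) (q : Int) (r : Int) : Int :=
  if p < 0 ∨ q < 0 ∨ r < 0 then 0
  else if p = 0 ∧ q = 0 then 1
  else if p = 0 ∨ q = 0 then
    let n := p + q + r
    pycomb n r * pycomb (n - r) p
  else
    let n := p + q
    let tmax := min (2 * min p q - (if p = q then 1 else 0)) (PySem.Int.floordiv r 2)
    bLoop p q r n tmax 1 1 1 1 1 (pycomb (r - 2 + n) n) 0

-- ===== PRECONDITION & SPEC =====
def Spec_w_exact (p : Int) (q : Int) (r : Int) (out : Int) : Prop := out = w_exact_alt p q r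
instance (p : Int) (q : Int) (r : Int) (out : Int) : Decidable (Spec_w_exact p q r out) := by unfold Spec_w_exact; infer_instance

-- ===== CLAIM (what is proved, stated in full; the proofs are below) =====
def Claim_equal_w_exact : Prop := ∀ (p : Int) (q : Int) (r : Int), Dom_w_exact p q r → Spec_w_exact p q r (w_exact p q r)

-- ===== LEMMAS AND PROOFS =====

-- the fully-guarded closed-form term for a run pair (a, b)
def pvP (p q r a b : Int) : Int :=
  if 1 ≤ a ∧ a ≤ p ∧ 1 ≤ b ∧ b ≤ q ∧ 2 * (a + b - 1) ≤ r then
    pycomb (p - 1) (a - 1) * pycomb (q - 1) (b - 1) * pycomb (r - 2 * (a + b - 1) + (p + q)) (p + q)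
  else 0

-- A's t-indexed term, with all guards made explicit
def pvG (p q r : Int) (t : Nat) : Int :=
  if t % 2 = 0 then
    pvP p q r (((t / 2 : Nat) : Int) + 1) ((t / 2 : Nat) : Int) +
      pvP p q r ((t / 2 : Nat) : Int) (((t / 2 : Nat) : Int) + 1)
  else 2 * pvP p q r (((t / 2 : Nat) : Int) + 1) (((t / 2 : Nat) : Int) + 1)

def pvSA (p q r : Int) (N : Nat) : Int := ((List.range N).map (pvG p q r)).sum

-- B's rolling indices and unguarded term
def pvHc (t : Int) : Int := PySem.Int.floordiv (t + 2) 2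
def pvLc (t : Int) : Int := PySem.Int.floordiv (t + 1) 2

def pvT (p q r t : Int) : Int :=
  (pycomb (p - 1) (pvHc t - 1) * pycomb (q - 1) (pvLc t - 1) +
    pycomb (p - 1) (pvLc t - 1) * pycomb (q - 1) (pvHc t - 1)) *
    pycomb (r - 2 * t + (p + q)) (p + q)

lemma pv_foldl_add (f : Int → Int) (l : List Int) (init : Int) :
    l.foldl (fun acc x => acc + f x) init = init + (l.map f).sum := by
  induction l generalizing init with
  | nil => simp
  | cons x t ih => simp [List.foldl, ih]; ring

lemma pv_skip (total c x : Int) : (if c = 0 then total else total + c * x) = total + c * x := by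
  split_ifs with h
  · rw [h]; ring
  · rfl

lemma pvP_of_guard (p q r a b X : Int) (hr2 : 2 * (a + b - 1) ≤ r)
    (hX : X = pycomb (r - 2 * (a + b - 1) + (p + q)) (p + q)) :
    (if a ≤ p ∧ b ≤ q ∧ 0 < a ∧ 0 < b then pycomb (p - 1) (a - 1) * pycomb (q - 1) (b - 1) else 0) * X
      = pvP p q r a b := by
  subst hX
  by_cases h : a ≤ p ∧ b ≤ q ∧ 0 < a ∧ 0 < b
  · rw [if_pos h, pvP, if_pos (by omega)]
  · rw [if_neg h, pvP, if_neg (by omega), zero_mul]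

-- body of A's loop equals pvG, inside the loop bounds
lemma pv_bodyA_eq (p q r : Int) (k : Nat) (hk2 : (k : Int) * 2 ≤ r) :
    ((if PySem.Int.floordiv ((k : Int) + 1 + 1) 2 ≤ p ∧ PySem.Int.floordiv ((k : Int) + 1) 2 ≤ q ∧
          0 < PySem.Int.floordiv ((k : Int) + 1 + 1) 2 ∧ 0 < PySem.Int.floordiv ((k : Int) + 1) 2 then
        pycomb (p - 1) (PySem.Int.floordiv ((k : Int) + 1 + 1) 2 - 1) *
          pycomb (q - 1) (PySem.Int.floordiv ((k : Int) + 1) 2 - 1) else 0)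
      + (if PySem.Int.floordiv ((k : Int) + 1) 2 ≤ p ∧ PySem.Int.floordiv ((k : Int) + 1 + 1) 2 ≤ q ∧
          0 < PySem.Int.floordiv ((k : Int) + 1) 2 ∧ 0 < PySem.Int.floordiv ((k : Int) + 1 + 1) 2 then
        pycomb (p - 1) (PySem.Int.floordiv ((k : Int) + 1) 2 - 1) *
          pycomb (q - 1) (PySem.Int.floordiv ((k : Int) + 1 + 1) 2 - 1) else 0))
      * pycomb ((r - 2 * (k : Int)) + (p + q)) (p + q) = pvG p q r k := by
  have d1 : PySem.Int.floordiv ((k : Int) + 1) 2 = (((k + 1) / 2 : Nat) : Int) := by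
    rw [show ((k : Int) + 1) = ((k + 1 : Nat) : Int) by push_cast; ring,
      show (2 : Int) = ((2 : Nat) : Int) by norm_num, PySem.Int.floordiv_natCast]
  have d2 : PySem.Int.floordiv ((k : Int) + 1 + 1) 2 = (((k + 2) / 2 : Nat) : Int) := by
    rw [show ((k : Int) + 1 + 1) = ((k + 2 : Nat) : Int) by push_cast; ring,
      show (2 : Int) = ((2 : Nat) : Int) by norm_num, PySem.Int.floordiv_natCast]
  rw [d1, d2, add_mul]
  rcases Nat.even_or_odd k with ⟨m, hm⟩ | ⟨m, hm⟩
  · subst hm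
    have E1 : (((m + m + 1) / 2 : Nat) : Int) = (m : Int) := by omega
    have E2 : (((m + m + 2) / 2 : Nat) : Int) = (m : Int) + 1 := by omega
    have E3 : (((m + m) / 2 : Nat) : Int) = (m : Int) := by omega
    rw [E1, E2, pvG, if_pos (by omega : (m + m) % 2 = 0), E3]
    congr 1
    · refine pvP_of_guard p q r ((m : Int) + 1) (m : Int) _ (by omega) ?_
      push_cast; ring_nf
    · refine pvP_of_guard p q r (m : Int) ((m : Int) + 1) _ (by omega) ?_
      push_cast; ring_nf
  · subst hm
    have E1 : (((2 * m + 1 + 1) / 2 : Nat) : Int) = (m : Int) + 1 := by omega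
    have E2 : (((2 * m + 1 + 2) / 2 : Nat) : Int) = (m : Int) + 1 := by omega
    have E3 : (((2 * m + 1) / 2 : Nat) : Int) = (m : Int) := by omega
    rw [E1, E2, pvG, if_neg (by omega : ¬ ((2 * m + 1) % 2 = 0)), E3,
      show (2 : Int) * pvP p q r ((m : Int) + 1) ((m : Int) + 1)
          = pvP p q r ((m : Int) + 1) ((m : Int) + 1) + pvP p q r ((m : Int) + 1) ((m : Int) + 1)
        from two_mul _]
    congr 1
    · refine pvP_of_guard p q r ((m : Int) + 1) ((m : Int) + 1) _ (by omega) ?_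
      push_cast; ring_nf
    · refine pvP_of_guard p q r ((m : Int) + 1) ((m : Int) + 1) _ (by omega) ?_
      push_cast; ring_nf

lemma pvA_main (p q r : Int) (hp : 1 ≤ p) (hq : 1 ≤ q) (hr : 0 ≤ r) :
    w_exact p q r = pvSA p q r
      (min (2 * min p q - (if p = q then 1 else 0)) (PySem.Int.floordiv r 2) + 1).toNat := by
  have hc1 : ¬ (p < 0 ∨ q < 0 ∨ r < 0) := by omega
  have hc2 : ¬ (p = 0 ∧ q = 0) := by omega
  have hc3 : ¬ (p = 0 ∨ q = 0) := by omega
  have h1 : (1 : Int) ≤ min p q := le_min hp hq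
  have htr : (0 : Int) ≤ 2 * min p q - (if p = q then 1 else 0) := by split_ifs <;> omega
  have hfd : (0 : Int) ≤ PySem.Int.floordiv r 2 :=
    (PySem.Int.le_floordiv_iff_mul_le (by norm_num)).mpr (by omega)
  simp only [w_exact, if_neg hc1, if_neg hc2, if_neg hc3, pv_skip]
  rw [pv_foldl_add, zero_add, PySem.List.pyRange_one, List.map_map, pvSA]
  apply congrArg List.sum
  simp only [sub_zero]
  apply List.map_congr_left
  intro k hk
  simp only [List.mem_range] at hk
  have hkT : (k : Int) ≤ min (2 * min p q - (if p = q then 1 else 0)) (PySem.Int.floordiv r 2) := by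
    have := le_min htr hfd
    omega
  have hk2 : (k : Int) * 2 ≤ r :=
    (PySem.Int.le_floordiv_iff_mul_le (by norm_num)).mp (le_trans hkT (min_le_right _ _))
  simp only [Function.comp, zero_add]
  exact pv_bodyA_eq p q r k hk2

-- pycomb vanishes above the top index
lemma pycomb_eq_zero (m k : Int) (hm : 0 ≤ m) (h : m < k) : pycomb m k = 0 := by
  simp [pycomb, Nat.choose_eq_zero_of_lt (show m.toNat < k.toNat by omega)]

-- Pascal-ratio update: C(p-1,k-1)*(p-k) // k = C(p-1,k)  (exact division)
lemma pv_roll (p k : Int) (hp : 1 ≤ p) (hk : 1 ≤ k) :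
    PySem.Int.floordiv (pycomb (p - 1) (k - 1) * (p - k)) k = pycomb (p - 1) k := by
  obtain ⟨P, hP⟩ : ∃ P : Nat, p - 1 = (P : Int) := ⟨(p - 1).toNat, by omega⟩
  obtain ⟨K, hK⟩ : ∃ K : Nat, k - 1 = (K : Int) := ⟨(k - 1).toNat, by omega⟩
  have hPt : (p - 1).toNat = P := by omega
  have hKt : (k - 1).toNat = K := by omega
  have hkt : k.toNat = K + 1 := by omega
  by_cases hle : K ≤ P
  · have hnum : pycomb (p - 1) (k - 1) * (p - k) = ((P.choose K * (P - K) : Nat) : Int) := by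
      simp only [pycomb, hPt, hKt]
      rw [show p - k = ((P - K : Nat) : Int) by omega, Nat.cast_mul]
    rw [hnum, show P.choose K * (P - K) = P.choose (K + 1) * (K + 1) from
        (Nat.choose_succ_right_eq P K).symm,
      show k = ((K + 1 : Nat) : Int) by omega, PySem.Int.floordiv_natCast,
      Nat.mul_div_cancel _ (by omega)]
    simp [pycomb, hPt]
  · have h0 : pycomb (p - 1) (k - 1) = 0 := pycomb_eq_zero _ _ (by omega) (by omega)
    rw [h0, zero_mul, show (0 : Int) = ((0 : Nat) : Int) by norm_num,
      show k = ((K + 1 : Nat) : Int) by omega, PySem.Int.floordiv_natCast]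
    simp [pycomb, hPt, Nat.choose_eq_zero_of_lt (by omega : P < K + 1)]

-- two-step downdate of the gap-weight binomial: C(M,n)*(M-n)*(M-n-1) // (M*(M-1)) = C(M-2,n)
lemma pv_rollw (n M : Int) (hn : 2 ≤ n) (hM : n ≤ M) :
    PySem.Int.floordiv (pycomb M n * (M - n) * (M - n - 1)) (M * (M - 1)) = pycomb (M - 2) n := by
  obtain ⟨m, hm⟩ : ∃ m : Nat, M = (m : Int) := ⟨M.toNat, by omega⟩
  obtain ⟨nn, hnn⟩ : ∃ nn : Nat, n = (nn : Int) := ⟨n.toNat, by omega⟩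
  have hmt : M.toNat = m := by omega
  have hnt : n.toNat = nn := by omega
  have hnnm : nn ≤ m := by omega
  have hnn2 : 2 ≤ nn := by omega
  have ediv : M * (M - 1) = ((m * (m - 1) : Nat) : Int) := by
    rw [Nat.cast_mul]
    have e1 : ((m : Nat) : Int) = M := by omega
    have e2 : (((m - 1 : Nat)) : Int) = M - 1 := by omega
    rw [e1, e2]
  by_cases hEq : M = n
  · have hnum : pycomb M n * (M - n) * (M - n - 1) = ((0 : Nat) : Int) := by
      rw [show M - n = 0 by omega]
      push_cast
      ring
    rw [hnum, ediv, PySem.Int.floordiv_natCast]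
    have h0 : pycomb (M - 2) n = 0 := pycomb_eq_zero _ _ (by omega) (by omega)
    simp [h0]
  · have hlt : nn < m := by omega
    have key : m.choose nn * (m - nn) * (m - nn - 1) = (m - 2).choose nn * (m * (m - 1)) := by
      have h1 : (m - 1).choose nn * m = m.choose nn * (m - nn) := by
        have := Nat.choose_mul_succ_eq (m - 1) nn
        rw [show m - 1 + 1 = m by omega] at this
        exact this
      have h2 : (m - 2).choose nn * (m - 1) = (m - 1).choose nn * (m - 1 - nn) := by
        have := Nat.choose_mul_succ_eq (m - 2) nn
        rw [show m - 2 + 1 = m - 1 by omega] at this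
        exact this
      calc m.choose nn * (m - nn) * (m - nn - 1)
          = (m - 1).choose nn * m * (m - nn - 1) := by rw [← h1]
        _ = ((m - 1).choose nn * (m - 1 - nn)) * m := by
            rw [show m - nn - 1 = m - 1 - nn by omega]; ring
        _ = ((m - 2).choose nn * (m - 1)) * m := by rw [← h2]
        _ = (m - 2).choose nn * (m * (m - 1)) := by ring
    have hnum : pycomb M n * (M - n) * (M - n - 1)
        = ((m.choose nn * (m - nn) * (m - nn - 1) : Nat) : Int) := by
      simp only [pycomb, hmt, hnt]
      rw [show M - n - 1 = ((m - nn - 1 : Nat) : Int) by omega,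
        show M - n = ((m - nn : Nat) : Int) by omega, Nat.cast_mul, Nat.cast_mul]
    rw [hnum, key, ediv, PySem.Int.floordiv_natCast,
      Nat.mul_div_cancel _ (Nat.mul_pos (by omega) (by omega))]
    simp only [pycomb, show (M - 2).toNat = m - 2 by omega, hnt]

-- unguarded form of pvP when only the ≤ p / ≤ q guards may fail (the combs are then 0)
lemma pvP_unguarded (p q r a b : Int) (hp : 1 ≤ p) (hq : 1 ≤ q) (ha : 1 ≤ a) (hb : 1 ≤ b)
    (hr : 2 * (a + b - 1) ≤ r) :
    pvP p q r a b = pycomb (p - 1) (a - 1) * pycomb (q - 1) (b - 1) *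
      pycomb (r - 2 * (a + b - 1) + (p + q)) (p + q) := by
  rw [pvP]
  split_ifs with h
  · rfl
  · have : p < a ∨ q < b := by omega
    rcases this with h1 | h2
    · rw [pycomb_eq_zero (p - 1) (a - 1) (by omega) (by omega)]; ring
    · rw [pycomb_eq_zero (q - 1) (b - 1) (by omega) (by omega)]; ring

-- B's unguarded term equals A's guarded term, inside the loop bounds
lemma pvT_eq_pvG (p q r : Int) (hp : 1 ≤ p) (hq : 1 ≤ q) (t : Int) (ht : 1 ≤ t)
    (htr : 2 * t ≤ r) : pvT p q r t = pvG p q r t.toNat := by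
  have hfd : ∀ x : Int, PySem.Int.floordiv x 2 = x / 2 := fun x =>
    PySem.Int.floordiv_eq_ediv_of_pos (by norm_num)
  rcases Nat.even_or_odd t.toNat with ⟨m, hm⟩ | ⟨m, hm⟩
  · -- t = 2m, m ≥ 1
    have htm : t = 2 * (m : Int) := by omega
    have hm1 : 1 ≤ (m : Int) := by omega
    have hH : pvHc t = (m : Int) + 1 := by unfold pvHc; rw [hfd]; omega
    have hL : pvLc t = (m : Int) := by unfold pvLc; rw [hfd]; omega
    have hG : pvG p q r t.toNat =
        pvP p q r ((m : Int) + 1) (m : Int) + pvP p q r (m : Int) ((m : Int) + 1) := by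
      rw [pvG, if_pos (by omega : t.toNat % 2 = 0), show t.toNat / 2 = m by omega]
    rw [hG, pvT, hH, hL,
      pvP_unguarded p q r ((m : Int) + 1) (m : Int) hp hq (by omega) (by omega) (by omega),
      pvP_unguarded p q r (m : Int) ((m : Int) + 1) hp hq (by omega) (by omega) (by omega),
      show r - 2 * ((m : Int) + 1 + (m : Int) - 1) + (p + q) = r - 2 * t + (p + q) by omega,
      show r - 2 * ((m : Int) + ((m : Int) + 1) - 1) + (p + q) = r - 2 * t + (p + q) by omega]
    ring
  · -- t = 2m + 1
    have htm : t = 2 * (m : Int) + 1 := by omega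
    have hH : pvHc t = (m : Int) + 1 := by unfold pvHc; rw [hfd]; omega
    have hL : pvLc t = (m : Int) + 1 := by unfold pvLc; rw [hfd]; omega
    have hG : pvG p q r t.toNat = 2 * pvP p q r ((m : Int) + 1) ((m : Int) + 1) := by
      rw [pvG, if_neg (by omega : ¬ t.toNat % 2 = 0), show t.toNat / 2 = m by omega]
    rw [hG, pvT, hH, hL,
      pvP_unguarded p q r ((m : Int) + 1) ((m : Int) + 1) hp hq (by omega) (by omega) (by omega),
      show r - 2 * ((m : Int) + 1 + ((m : Int) + 1) - 1) + (p + q) = r - 2 * t + (p + q) by omega]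
    ring

-- loop invariant: started with the correct rolling values at t, bLoop adds Σ pvT over t..tmax
lemma pv_bLoop_inv (p q r : Int) (hp : 1 ≤ p) (hq : 1 ≤ q) (tmax : Int) (htm : 2 * tmax ≤ r)
    (fuel : Nat) : ∀ (t total : Int), 1 ≤ t → (tmax + 1 - t).toNat = fuel →
    bLoop p q r (p + q) tmax t (pycomb (p - 1) (pvHc t - 1)) (pycomb (p - 1) (pvLc t - 1))
      (pycomb (q - 1) (pvHc t - 1)) (pycomb (q - 1) (pvLc t - 1))
      (pycomb (r - 2 * t + (p + q)) (p + q)) total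
    = total + ((List.range fuel).map (fun i : Nat => pvT p q r (t + (i : Int)))).sum := by
  induction fuel with
  | zero =>
    intro t total ht hf
    rw [bLoop, dif_neg (by omega)]
    simp
  | succ f ih =>
    intro t total ht hf
    have htle : t ≤ tmax := by omega
    have hfd : ∀ x : Int, PySem.Int.floordiv x 2 = x / 2 := fun x =>
      PySem.Int.floordiv_eq_ediv_of_pos (by norm_num)
    have hmod : PySem.Int.mod t 2 = t % 2 := PySem.Int.mod_eq_emod_of_pos (by norm_num)
    have hn2 : (2 : Int) ≤ p + q := by omega
    have hMn : p + q ≤ r - 2 * t + (p + q) := by omega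
    have hw' : PySem.Int.floordiv
        (pycomb (r - 2 * t + (p + q)) (p + q) * (r - 2 * t + (p + q) - (p + q)) *
          (r - 2 * t + (p + q) - (p + q) - 1)) ((r - 2 * t + (p + q)) * (r - 2 * t + (p + q) - 1))
        = pycomb (r - 2 * (t + 1) + (p + q)) (p + q) := by
      rw [pv_rollw (p + q) (r - 2 * t + (p + q)) hn2 hMn,
        show r - 2 * t + (p + q) - 2 = r - 2 * (t + 1) + (p + q) by ring]
    have hsum : ((List.range (f + 1)).map (fun i : Nat => pvT p q r (t + (i : Int)))).sum
        = pvT p q r t + ((List.range f).map (fun i : Nat => pvT p q r (t + 1 + (i : Int)))).sum := by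
      rw [List.range_succ_eq_map]
      simp only [List.map_cons, List.map_map, List.sum_cons, Nat.cast_zero, add_zero]
      congr 1
      apply congrArg List.sum
      apply List.map_congr_left
      intro i _
      simp only [Function.comp_apply]
      congr 1
      push_cast
      ring
    have IH := ih (t + 1) (total + (pycomb (p - 1) (pvHc t - 1) * pycomb (q - 1) (pvLc t - 1) +
      pycomb (p - 1) (pvLc t - 1) * pycomb (q - 1) (pvHc t - 1)) *
        pycomb (r - 2 * t + (p + q)) (p + q)) (by omega) (by omega)
    rw [bLoop, dif_pos htle]
    by_cases hodd : t % 2 = 1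
    · simp only [hmod, if_pos hodd]
      have hH1 : (1 : Int) ≤ pvHc t := by unfold pvHc; rw [hfd]; omega
      have hrollp : PySem.Int.floordiv
          (pycomb (p - 1) (pvHc t - 1) * (p - PySem.Int.floordiv (t + 2) 2))
          (PySem.Int.floordiv (t + 2) 2) = pycomb (p - 1) (pvHc t) :=
        pv_roll p (pvHc t) hp hH1
      have hrollq : PySem.Int.floordiv
          (pycomb (q - 1) (pvHc t - 1) * (q - PySem.Int.floordiv (t + 2) 2))
          (PySem.Int.floordiv (t + 2) 2) = pycomb (q - 1) (pvHc t) :=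
        pv_roll q (pvHc t) hq hH1
      have eH : pvHc (t + 1) - 1 = pvHc t := by
        unfold pvHc; rw [hfd, hfd]; omega
      have eL : pvLc (t + 1) = pvLc t := by
        unfold pvLc; rw [hfd, hfd]; omega
      rw [eH, eL] at IH
      rw [hrollp, hrollq, hw', IH, hsum, pvT]
      ring
    · simp only [hmod, if_neg hodd]
      have hL1 : (1 : Int) ≤ pvLc t := by unfold pvLc; rw [hfd]; omega
      have hrollp : PySem.Int.floordiv
          (pycomb (p - 1) (pvLc t - 1) * (p - PySem.Int.floordiv (t + 1) 2))
          (PySem.Int.floordiv (t + 1) 2) = pycomb (p - 1) (pvLc t) :=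
        pv_roll p (pvLc t) hp hL1
      have hrollq : PySem.Int.floordiv
          (pycomb (q - 1) (pvLc t - 1) * (q - PySem.Int.floordiv (t + 1) 2))
          (PySem.Int.floordiv (t + 1) 2) = pycomb (q - 1) (pvLc t) :=
        pv_roll q (pvLc t) hq hL1
      have eH : pvHc (t + 1) = pvHc t := by
        unfold pvHc; rw [hfd, hfd]; omega
      have eL : pvLc (t + 1) - 1 = pvLc t := by
        unfold pvLc; rw [hfd, hfd]; omega
      rw [eH, eL] at IH
      rw [hrollp, hrollq, hw', IH, hsum, pvT]
      ring

lemma pvB_main (p q r : Int) (hp : 1 ≤ p) (hq : 1 ≤ q) (hr : 0 ≤ r) :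
    w_exact_alt p q r =
      ((List.range (min (2 * min p q - (if p = q then 1 else 0))
          (PySem.Int.floordiv r 2)).toNat).map (fun i : Nat => pvT p q r (1 + (i : Int)))).sum := by
  have hc1 : ¬ (p < 0 ∨ q < 0 ∨ r < 0) := by omega
  have hc2 : ¬ (p = 0 ∧ q = 0) := by omega
  have hc3 : ¬ (p = 0 ∨ q = 0) := by omega
  have htm : 2 * min (2 * min p q - (if p = q then 1 else 0)) (PySem.Int.floordiv r 2) ≤ r := by
    have h2 : min (2 * min p q - (if p = q then 1 else 0)) (PySem.Int.floordiv r 2) ≤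
        PySem.Int.floordiv r 2 := min_le_right _ _
    have := (PySem.Int.le_floordiv_iff_mul_le (a := r) (b := 2)
      (q := min (2 * min p q - (if p = q then 1 else 0)) (PySem.Int.floordiv r 2)) (by norm_num)).mp h2
    omega
  simp only [w_exact_alt, if_neg hc1, if_neg hc2, if_neg hc3]
  have hseed :
      bLoop p q r (p + q) (min (2 * min p q - (if p = q then 1 else 0)) (PySem.Int.floordiv r 2))
        1 1 1 1 1 (pycomb (r - 2 + (p + q)) (p + q)) 0 =
      bLoop p q r (p + q) (min (2 * min p q - (if p = q then 1 else 0)) (PySem.Int.floordiv r 2))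
        1 (pycomb (p - 1) (pvHc 1 - 1)) (pycomb (p - 1) (pvLc 1 - 1))
        (pycomb (q - 1) (pvHc 1 - 1)) (pycomb (q - 1) (pvLc 1 - 1))
        (pycomb (r - 2 * 1 + (p + q)) (p + q)) 0 := by
    rw [show pvHc 1 = 1 by decide, show pvLc 1 = 1 by decide]
    norm_num [pycomb]
  rw [hseed, pv_bLoop_inv p q r hp hq _ htm _ 1 0 (by norm_num) rfl, zero_add]
  norm_num

-- A's t = 0 term vanishes (a run count would be 0)
lemma pvG_zero_term (p q r : Int) : pvG p q r 0 = 0 := by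
  have h : pvG p q r 0 = pvP p q r 1 0 + pvP p q r 0 1 := by
    norm_num [pvG]
  rw [h, pvP, if_neg (by omega), pvP, if_neg (by omega)]
  norm_num

-- ===== VERDICT (by name: the statement is the Claim_ definition above) =====
theorem w_exact_spec : Claim_equal_w_exact := by
  intro p q r _
  unfold Spec_w_exact
  by_cases hg1 : p < 0 ∨ q < 0 ∨ r < 0
  · simp [w_exact, w_exact_alt, hg1]
  · by_cases hg2 : p = 0 ∧ q = 0
    · simp [w_exact, w_exact_alt, hg2]
    · by_cases hg3 : p = 0 ∨ q = 0
      · simp [w_exact, w_exact_alt, hg1, hg2, hg3]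
      · have hp : 1 ≤ p := by omega
        have hq : 1 ≤ q := by omega
        have hr : 0 ≤ r := by omega
        set T : Int := min (2 * min p q - (if p = q then 1 else 0)) (PySem.Int.floordiv r 2)
          with hT
        have h1 : (1 : Int) ≤ min p q := le_min hp hq
        have htr : (0 : Int) ≤ 2 * min p q - (if p = q then 1 else 0) := by split_ifs <;> omega
        have hfd0 : (0 : Int) ≤ PySem.Int.floordiv r 2 :=
          (PySem.Int.le_floordiv_iff_mul_le (by norm_num)).mpr (by omega)
        have hT0 : (0 : Int) ≤ T := le_min htr hfd0
        have h2T : 2 * T ≤ r := by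
          have := (PySem.Int.le_floordiv_iff_mul_le (a := r) (b := 2) (q := T)
            (by norm_num)).mp (min_le_right _ _)
          omega
        have hA := pvA_main p q r hp hq hr
        have hB := pvB_main p q r hp hq hr
        rw [hA, hB, ← hT]
        have hN : (T + 1).toNat = T.toNat + 1 := by omega
        rw [pvSA, hN, List.range_succ_eq_map]
        simp only [List.map_cons, List.map_map, List.sum_cons, pvG_zero_term, zero_add]
        apply congrArg List.sum
        apply List.map_congr_left
        intro i hi
        simp only [List.mem_range] at hi
        have h2i : 2 * (1 + (i : Int)) ≤ r := by omega
        rw [Function.comp_apply, pvT_eq_pvG p q r hp hq (1 + (i : Int)) (by omega) h2i]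
        congr 1
        omega
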